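-- pv_equiv track=rewrite | github.com/FrozenM/Bingo_Jimenez | src/bingo.py | no_haya_numero_repetido
-- ===== SOURCE A (Python) =====
-- def no_haya_numero_repetido(mi_carton):
--   numeros = set()
--   for fila in mi_carton:
--     for celda in fila:
--       if (celda in numeros) and celda != 0:
--         return False
--       numeros.add(celda)
--   return True
-- ===== SOURCE B (Python) =====
-- def no_haya_numero_repetido(mi_carton):
--     nums = [c for fila in mi_carton for c in fila if c != 0]
--     return len(nums) == len(set(nums))
-- ===== Notes on version B (the rewrite author's own statement) =====
-- stated objective: simpler
-- what changed: Replaces the incremental set-membership loop with early return by a two-phase computation: collect all nonzero cells into one list, then compare its length with the length of its set of distinct values.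
import Mathlib
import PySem

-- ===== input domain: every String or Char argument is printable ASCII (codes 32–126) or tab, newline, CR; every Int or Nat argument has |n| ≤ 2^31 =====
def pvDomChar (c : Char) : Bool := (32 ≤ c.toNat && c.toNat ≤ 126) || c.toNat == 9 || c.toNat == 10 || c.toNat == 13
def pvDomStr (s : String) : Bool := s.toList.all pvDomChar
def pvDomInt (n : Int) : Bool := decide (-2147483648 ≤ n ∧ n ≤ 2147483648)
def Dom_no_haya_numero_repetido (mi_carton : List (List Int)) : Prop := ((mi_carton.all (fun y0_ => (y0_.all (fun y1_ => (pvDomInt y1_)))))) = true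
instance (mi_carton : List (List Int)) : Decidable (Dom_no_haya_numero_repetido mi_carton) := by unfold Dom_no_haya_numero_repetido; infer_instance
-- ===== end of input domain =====

-- B collects all nonzero cells into one list and compares its length with the number of
-- distinct values (simpler two-phase formulation; same O(n) cost, no early return).

-- ===== PORT A =====
-- inner 'for celda in fila' loop: none models the early 'return False'
def pvInnerA : List Int → PySem.Set Int → Option (PySem.Set Int)
  | [], numeros => some numeros
  | celda :: rest, numeros =>
    if numeros.contains celda && !(celda == 0) then none
    else pvInnerA rest (numeros.add celda)

-- outer 'for fila in mi_carton' loop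
def pvOuterA : List (List Int) → PySem.Set Int → Bool
  | [], _ => true
  | fila :: rest, numeros =>
    match pvInnerA fila numeros with
    | none => false
    | some numeros' => pvOuterA rest numeros'

def no_haya_numero_repetido (mi_carton : List (List Int)) : Bool :=
  pvOuterA mi_carton PySem.Set.empty

-- ===== PORT B =====
def no_haya_numero_repetido_alt (mi_carton : List (List Int)) : Bool :=
  let nums := mi_carton.flatMap (fun fila => fila.filter (fun c => c != 0))
  nums.length == (PySem.Set.ofList nums).length

-- ===== PRECONDITION & SPEC =====
def Spec_no_haya_numero_repetido (mi_carton : List (List Int)) (out : Bool) : Prop := out = no_haya_numero_repetido_alt mi_carton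
instance (mi_carton : List (List Int)) (out : Bool) : Decidable (Spec_no_haya_numero_repetido mi_carton out) := by unfold Spec_no_haya_numero_repetido; infer_instance

-- ===== CLAIM (what is proved, stated in full; the proofs are below) =====
def Claim_equal_no_haya_numero_repetido : Prop := ∀ (mi_carton : List (List Int)), Dom_no_haya_numero_repetido mi_carton → Spec_no_haya_numero_repetido mi_carton (no_haya_numero_repetido mi_carton)

-- ===== LEMMAS AND PROOFS =====

-- pvInnerA on an appended list is the bind of the two halves
theorem pvInnerA_append (xs ys : List Int) (s : PySem.Set Int) :
    pvInnerA (xs ++ ys) s = (pvInnerA xs s).bind (pvInnerA ys) := by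
  induction xs generalizing s with
  | nil => simp [pvInnerA]
  | cons c cs ih =>
    simp only [List.cons_append, pvInnerA]
    split
    · rfl
    · exact ih _

-- the outer loop is the inner loop on the flattened card
theorem pvOuterA_eq_flat (carton : List (List Int)) (s : PySem.Set Int) :
    pvOuterA carton s = (pvInnerA (carton.flatMap id) s).isSome := by
  induction carton generalizing s with
  | nil => simp [pvOuterA, pvInnerA]
  | cons fila rest ih =>
    simp only [pvOuterA, List.flatMap_cons, id, pvInnerA_append]
    cases h : pvInnerA fila s with
    | none => simp
    | some s' => simp [ih]

-- characterisation of the inner loop: it succeeds iff the nonzero entries are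
-- pairwise distinct and none of them is already in the accumulated set
theorem pvInnerA_char (xs : List Int) (s : PySem.Set Int) :
    (pvInnerA xs s).isSome = true ↔
      ((xs.filter (fun c => c != 0)).Nodup ∧ ∀ x ∈ xs, x ≠ 0 → x ∉ s) := by
  induction xs generalizing s with
  | nil => simp [pvInnerA]
  | cons c cs ih =>
    simp only [pvInnerA]
    split
    · rename_i hcond
      simp only [Bool.and_eq_true, PySem.Set.contains_iff, Bool.not_eq_true',
        beq_eq_false_iff_ne, ne_eq] at hcond
      simp only [Option.isSome_none]
      constructor
      · intro h; cases h
      · rintro ⟨-, hall⟩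
        exact absurd hcond.1 (hall c (List.mem_cons_self) hcond.2)
    · rename_i hcond
      rw [ih]
      simp only [Bool.and_eq_true, PySem.Set.contains_iff, Bool.not_eq_true',
        beq_eq_false_iff_ne, ne_eq, not_and, not_not] at hcond
      by_cases hc0 : c = 0
      · subst hc0
        simp only [List.filter_cons, bne_self_eq_false, List.mem_cons]
        constructor
        · rintro ⟨hnd, hall⟩
          refine ⟨hnd, ?_⟩
          rintro x (rfl | hx) hx0
          · exact absurd rfl hx0
          · intro hmem
            exact hall x hx hx0 (by simp [PySem.Set.mem_add, hmem])
        · rintro ⟨hnd, hall⟩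
          refine ⟨hnd, ?_⟩
          intro x hx hx0 hmem
          rw [PySem.Set.mem_add] at hmem
          rcases hmem with hmem | rfl
          · exact hall x (Or.inr hx) hx0 hmem
          · exact hx0 rfl
      · have hcns : c ∉ s := fun h => hc0 (hcond h)
        clear hcond
        simp only [List.filter_cons, bne_iff_ne, ne_eq, hc0, not_false_eq_true, if_pos,
          List.nodup_cons, List.mem_filter, List.mem_cons]
        constructor
        · rintro ⟨hnd, hall⟩
          refine ⟨⟨?_, hnd⟩, ?_⟩
          · rintro ⟨hmemc, -⟩
            exact hall c hmemc hc0 (by simp [PySem.Set.mem_add]) |>.elim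
          · rintro x (rfl | hx) hx0
            · exact hcns
            · intro hmem
              exact hall x hx hx0 (by simp [PySem.Set.mem_add, hmem])
        · rintro ⟨⟨hcnf, hnd⟩, hall⟩
          refine ⟨hnd, ?_⟩
          intro x hx hx0 hmem
          rw [PySem.Set.mem_add] at hmem
          rcases hmem with hmem | rfl
          · exact hall x (Or.inr hx) hx0 hmem
          · exact hcnf ⟨hx, by simp⟩

-- length bound for the fold that builds a set
theorem foldl_add_length_le (xs : List Int) (s : PySem.Set Int) :
    (xs.foldl PySem.Set.add s).length ≤ s.length + xs.length := by
  induction xs generalizing s with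
  | nil => simp
  | cons x xs ih =>
    simp only [List.foldl_cons, List.length_cons]
    calc (xs.foldl PySem.Set.add (s.add x)).length
        ≤ (s.add x).length + xs.length := ih _
      _ ≤ s.length + (xs.length + 1) := by
          unfold PySem.Set.add
          split
          · simp
          · simp only [List.length_append, List.length_cons, List.length_nil]
            omega

-- length equality for the set-building fold characterises freshness + no duplicates
theorem foldl_add_length_eq_iff (xs : List Int) (s : PySem.Set Int) :
    ((xs.foldl PySem.Set.add s).length = s.length + xs.length) ↔
      (xs.Nodup ∧ ∀ x ∈ xs, x ∉ s) := by
  induction xs generalizing s with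
  | nil => simp
  | cons x xs ih =>
    simp only [List.foldl_cons, List.length_cons]
    by_cases hx : x ∈ s
    · have hadd : PySem.Set.add s x = s := by
        unfold PySem.Set.add
        rw [if_pos (PySem.Set.contains_iff s x |>.2 hx)]
      rw [hadd]
      constructor
      · intro h
        have := foldl_add_length_le xs s
        omega
      · rintro ⟨-, hall⟩
        exact absurd hx (hall x List.mem_cons_self)
    · have hadd : PySem.Set.add s x = s ++ [x] := by
        unfold PySem.Set.add
        rw [if_neg]
        intro h
        exact hx (PySem.Set.contains_iff s x |>.1 h)
      have hlen : List.length s + (xs.length + 1) = (s ++ [x]).length + xs.length := by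
        simp
        omega
      rw [hadd, hlen, ih]
      constructor
      · rintro ⟨hnd, hall⟩
        refine ⟨List.nodup_cons.2 ⟨fun hmem => (hall x hmem) (by simp), hnd⟩, ?_⟩
        intro y hy
        rcases List.mem_cons.1 hy with rfl | hy'
        · exact hx
        · exact fun hys => hall y hy' (by simp [hys])
      · rintro ⟨hnd, hall⟩
        obtain ⟨hxs, hnd'⟩ := List.nodup_cons.1 hnd
        refine ⟨hnd', fun y hy hmem => ?_⟩
        rcases List.mem_append.1 hmem with hys | hyx
        · exact hall y (List.mem_cons_of_mem _ hy) hys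
        · have hyx' : y = x := by simpa using hyx
          exact hxs (hyx' ▸ hy)

-- the set built from xs has the same length as xs iff xs has no duplicates
theorem length_ofList_eq_iff (xs : List Int) :
    ((PySem.Set.ofList xs).length = xs.length) ↔ xs.Nodup := by
  rw [PySem.Set.ofList_eq_foldl]
  have := foldl_add_length_eq_iff xs []
  simpa using this

-- ===== VERDICT (by name: the statement is the Claim_ definition above) =====
theorem no_haya_numero_repetido_spec : Claim_equal_no_haya_numero_repetido := by
  intro carton _
  unfold Spec_no_haya_numero_repetido no_haya_numero_repetido no_haya_numero_repetido_alt
  rw [Bool.eq_iff_iff, pvOuterA_eq_flat, pvInnerA_char]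
  simp only [beq_iff_eq]
  rw [eq_comm, length_ofList_eq_iff]
  constructor
  · rintro ⟨hnd, -⟩
    simpa [List.filter_flatMap] using hnd
  · intro h
    refine ⟨by simpa [List.filter_flatMap] using h, ?_⟩
    intro x _ _ hx
    simp [PySem.Set.empty] at hx
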